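-- pv_equiv track=rewrite | github.com/tcbegley/advent-of-code | 2023/day11.py | locate_galaxies
-- ===== SOURCE A (Python) =====
-- def locate_galaxies(grid, expand=2):
--     row_map = [0] * len(grid)
--     row = 0
--     for r in range(len(grid)):
--         row_map[r] = row
--         if all(char == "." for char in grid[r]):
--             row += expand
--         else:
--             row += 1
--
--     col_map = [0] * len(grid[0])
--     col = 0
--     for c in range(len(grid[0])):
--         col_map[c] = col
--         if all(grid[r][c] == "." for r in range(len(grid))):
--             col += expand
--         else:
--             col += 1
--
--     return [
--         (row_map[r], col_map[c])
--         for r, row in enumerate(grid)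
--         for c, char in enumerate(row)
--         if char == "#"
--     ]
-- ===== SOURCE B (Python) =====
-- def locate_galaxies(grid, expand=2):
--     h, w = len(grid), len(grid[0])
--     empty_rows = [r for r in range(h) if all(ch == "." for ch in grid[r])]
--     empty_cols = [c for c in range(w) if all(grid[r][c] == "." for r in range(h))]
--     k = expand - 1
--     return [
--         (r + k * sum(1 for e in empty_rows if e < r),
--          c + k * sum(1 for e in empty_cols if e < c))
--         for r, row in enumerate(grid)
--         for c, ch in enumerate(row)
--         if ch == "#"
--     ]
-- ===== Notes on version B (the rewrite author's own statement) =====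
-- stated objective: simpler
-- what changed: Replaces A's two mutable prefix-offset arrays (row_map/col_map built by sequential accumulator loops) with direct per-galaxy offset counting: coordinate + (expand-1) * number of empty rows/columns strictly before it.
import Mathlib
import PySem

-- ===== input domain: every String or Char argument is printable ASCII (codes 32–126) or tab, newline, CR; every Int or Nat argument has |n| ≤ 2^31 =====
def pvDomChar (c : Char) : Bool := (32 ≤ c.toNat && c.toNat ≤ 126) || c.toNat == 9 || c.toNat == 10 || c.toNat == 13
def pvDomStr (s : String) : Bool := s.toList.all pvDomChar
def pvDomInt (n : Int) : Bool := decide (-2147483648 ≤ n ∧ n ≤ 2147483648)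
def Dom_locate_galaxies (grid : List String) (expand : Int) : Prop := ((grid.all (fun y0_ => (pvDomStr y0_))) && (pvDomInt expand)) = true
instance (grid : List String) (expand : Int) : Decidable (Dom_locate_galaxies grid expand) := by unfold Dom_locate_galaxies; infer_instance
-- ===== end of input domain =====

-- B replaces A's mutable prefix-offset arrays with direct per-galaxy counting of empty
-- rows/columns strictly before the coordinate (objective: simpler).

-- shared emptiness tests (identical in both Pythons):
-- all(char == "." for char in grid[r])
def lgRowAllDot (s : String) : Bool := s.toList.all (fun ch => ch == '.')
-- all(grid[r][c] == "." for r in range(len(grid)))  (in-range on Pre_ inputs)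
def lgColAllDot (grid : List String) (c : Nat) : Bool :=
  grid.all (fun s => s.toList.getD c '?' == '.')

-- ===== PORT A =====
-- the sequential accumulator loop writing map[r] = acc, then acc += expand or 1
def lgMapGo (expand : Int) (f : Nat → Bool) : List Nat → Int → List Int
  | [], _ => []
  | c :: rest, acc =>
      acc :: lgMapGo expand f rest (if f c then acc + expand else acc + 1)

def locate_galaxies (grid : List String) (expand : Int) : List (Int × Int) :=
  let row_map := lgMapGo expand (fun r => lgRowAllDot (grid.getD r "")) (List.range grid.length) 0
  let col_map := lgMapGo expand (fun c => lgColAllDot grid c) (List.range (grid.headD "").length) 0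
  (PySem.List.enumerate grid).flatMap (fun rp =>
    ((PySem.List.enumerate rp.2.toList).filter (fun p => p.2 == '#')).map
      (fun p => (row_map.getD rp.1.toNat 0, col_map.getD p.1.toNat 0)))

-- ===== PORT B =====
def lgCountLt (xs : List Nat) (v : Nat) : Int := ((xs.filter (fun e => e < v)).length : Int)

def locate_galaxies_alt (grid : List String) (expand : Int) : List (Int × Int) :=
  let h := grid.length
  let w := (grid.headD "").length
  let emptyRows := (List.range h).filter (fun r => lgRowAllDot (grid.getD r ""))
  let emptyCols := (List.range w).filter (fun c => lgColAllDot grid c)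
  let k := expand - 1
  (PySem.List.enumerate grid).flatMap (fun rp =>
    ((PySem.List.enumerate rp.2.toList).filter (fun p => p.2 == '#')).map
      (fun p => (rp.1 + k * lgCountLt emptyRows rp.1.toNat,
                 p.1 + k * lgCountLt emptyCols p.1.toNat)))

-- ===== PRECONDITION & SPEC =====
-- Pre_ is exactly the set of inputs on which A returns normally: it excludes the empty grid,
-- grids with a '#' at a column ≥ len(grid[0]), and ragged grids whose column scans reach an
-- out-of-range index before short-circuiting (on all of these A raises IndexError).
def Pre_locate_galaxies (grid : List String) (expand : Int) : Prop :=
  grid ≠ [] ∧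
  (∀ s ∈ grid, ((s.toList.drop (grid.headD "").length).all (fun ch => ch ≠ '#')) = true) ∧
  (∀ c < (grid.headD "").length, ∀ r < grid.length,
    (∀ r' < r, c < (grid.getD r' "").length ∧ (grid.getD r' "").toList.getD c '?' = '.') →
      c < (grid.getD r "").length)

instance (grid : List String) (expand : Int) : Decidable (Pre_locate_galaxies grid expand) := by
  unfold Pre_locate_galaxies; infer_instance

def pvWitness_locate_galaxies : List String × Int := (["#.", ".."], 2)

def Spec_locate_galaxies (grid : List String) (expand : Int) (out : List (Int × Int)) : Prop := out = locate_galaxies_alt grid expand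
instance (grid : List String) (expand : Int) (out : List (Int × Int)) : Decidable (Spec_locate_galaxies grid expand out) := by unfold Spec_locate_galaxies; infer_instance

-- ===== CLAIM (what is proved, stated in full; the proofs are below) =====
def Claim_equal_locate_galaxies : Prop := ∀ (grid : List String) (expand : Int), Dom_locate_galaxies grid expand → Pre_locate_galaxies grid expand → Spec_locate_galaxies grid expand (locate_galaxies grid expand)

-- ===== LEMMAS AND PROOFS =====

-- filtering range n below i ≤ n is range i
theorem lg_range_filter_lt (n i : Nat) (h : i ≤ n) :
    (List.range n).filter (fun e => decide (e < i)) = List.range i := by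
  induction n with
  | zero => interval_cases i; simp
  | succ m ih =>
    by_cases hi : i = m + 1
    · subst hi
      apply List.filter_eq_self.mpr
      intro a ha
      simp only [List.mem_range] at ha
      simpa using ha
    · have hi' : i ≤ m := by omega
      rw [List.range_succ, List.filter_append, ih hi']
      simp [Nat.not_lt.mpr hi']

-- the value at index i of A's accumulator loop is acc + i + (expand-1) * (#empty before i)
theorem lg_mapGo_getD (expand : Int) (f : Nat → Bool) :
    ∀ (i m s : Nat) (acc : Int), i < m →
      (lgMapGo expand f (List.range' s m) acc).getD i 0
        = acc + (i : Int) + (expand - 1) * (((List.range' s i).filter f).length : Int) := by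
  intro i
  induction i with
  | zero =>
    intro m s acc hm
    cases m with
    | zero => omega
    | succ m' => simp [List.range'_succ, lgMapGo]
  | succ j ih =>
    intro m s acc hm
    cases m with
    | zero => omega
    | succ m' =>
      rw [List.range'_succ]
      simp only [lgMapGo, List.getD_cons_succ]
      rw [ih m' (s+1) _ (by omega)]
      rw [List.range'_succ, List.filter_cons]
      by_cases hf : f s = true
      · simp [hf]; ring
      · simp [hf]; ring

theorem lg_mapGo_range_getD (expand : Int) (f : Nat → Bool) (n i : Nat) (h : i < n) :
    (lgMapGo expand f (List.range n) 0).getD i 0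
      = (i : Int) + (expand - 1) * ((List.range n).filter (fun e => decide (e < i) && f e)).length := by
  rw [List.range_eq_range', lg_mapGo_getD expand f i n 0 0 h]
  simp only [← List.range_eq_range']
  have h1 : (List.range n).filter (fun e => decide (e < i) && f e) = (List.range i).filter f := by
    rw [← lg_range_filter_lt n i (le_of_lt h), List.filter_filter]
    apply List.filter_congr
    intro a _
    simp [Bool.and_comm]
  rw [h1]
  ring

-- B's count over the filtered empties equals the combined filter count
theorem lg_countLt_eq (f : Nat → Bool) (n i : Nat) :
    lgCountLt ((List.range n).filter f) i
      = (((List.range n).filter (fun e => decide (e < i) && f e)).length : Int) := by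
  unfold lgCountLt
  rw [List.filter_filter]

-- membership in enumerate gives the Nat index and the element
theorem lg_mem_enumerate {α : Type} {p : Int × α} {xs : List α}
    (h : p ∈ PySem.List.enumerate xs 0) :
    ∃ (k : Nat) (hk : k < xs.length), p = ((k : Int), xs[k]) := by
  rcases (PySem.List.mem_enumerate_iff xs 0 p).1 h with ⟨k, hk, hp⟩
  exact ⟨k, hk, by simpa using hp⟩

-- ===== VERDICT (by name: the statement is the Claim_ definition above) =====
theorem locate_galaxies_spec : Claim_equal_locate_galaxies := by
  intro grid expand _ hpre
  obtain ⟨hne, hrow, -⟩ := hpre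
  unfold Spec_locate_galaxies locate_galaxies locate_galaxies_alt
  simp only []
  apply List.flatMap_congr
  intro rp hrp
  obtain ⟨r, hr, rfl⟩ := lg_mem_enumerate hrp
  apply List.map_congr_left
  intro p hp
  have hpmem := List.mem_of_mem_filter hp
  have hhash : p.2 = '#' := by
    have := List.of_mem_filter hp
    simpa using this
  obtain ⟨c, hc, hpc⟩ := lg_mem_enumerate hpmem
  -- column bound: '#' can only occur before width w
  set w := (grid.headD "").length with hw
  have hrowpre := hrow _ (List.getElem_mem hr)
  have hlen : c < grid[r].toList.length := by simpa using hc
  have hchar : grid[r].toList[c] = '#' := by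
    have := hhash
    rw [hpc] at this
    simpa using this
  have hcw : c < w := by
    by_contra hcwn
    rw [not_lt] at hcwn
    have hall := hrowpre
    rw [List.all_eq_true] at hall
    have hj : c - w < (grid[r].toList.drop w).length := by
      rw [List.length_drop]; omega
    have hget : (grid[r].toList.drop w)[c - w] = grid[r].toList[w + (c - w)]'(by omega) :=
      List.getElem_drop
    have hmem : grid[r].toList[c] ∈ grid[r].toList.drop w := by
      have : grid[r].toList[w + (c - w)]'(by omega) = grid[r].toList[c] := by
        congr 1; omega
      rw [← this, ← hget]
      exact List.getElem_mem hj
    have := hall _ hmem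
    simp [hchar] at this
  subst hpc
  simp only [Int.toNat_natCast, Prod.mk.injEq]
  refine ⟨?_, ?_⟩
  · rw [lg_mapGo_range_getD expand _ grid.length r hr,
        lg_countLt_eq (fun r => lgRowAllDot (grid.getD r "")) grid.length r]
  · rw [lg_mapGo_range_getD expand _ w c hcw,
        lg_countLt_eq (fun c => lgColAllDot grid c) w c]
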